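-- pv_equiv track=rewrite | github.com/atomer2020/nzlotto | Validate.py | validate_lottery_numbers
-- ===== SOURCE A (Python) =====
-- def validate_lottery_numbers(prediction):
--     # 检查主号码和bonus是否有重复
--     main_numbers = prediction[:6]
--     bonus_number = prediction[6]
--     powerball_number = prediction[7]
--
--     if len(set(main_numbers + [bonus_number])) != len(main_numbers) + 1:
--         return False, "Duplicate numbers found among main numbers and bonus."
--
--     # 检查主号码和bonus是否在有效范围内
--     for num in main_numbers:
--         if not (1 <= num <= 40):
--             return False, "Main numbers should be between 1 and 40."
--
--     if not (1 <= bonus_number <= 40):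
--         return False, "Bonus number should be between 1 and 40."
--
--     if not (1 <= powerball_number <= 10):
--         return False, "Powerball number should be between 1 and 10."
--
--     # 检查是否存在连续四个或五个整数
--     main_numbers_sorted = sorted(main_numbers)
--     for i in range(len(main_numbers_sorted) - 4):
--         if main_numbers_sorted[i+4] - main_numbers_sorted[i] == 4:
--             return False, "Avoiding consecutive number patterns of 5 integers."
--     for i in range(len(main_numbers_sorted) - 3):
--         if main_numbers_sorted[i+3] - main_numbers_sorted[i] == 3:
--             return False, "Avoiding consecutive number patterns of 4 integers."
--
--     return True, "Validation successful."
-- ===== SOURCE B (Python) =====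
-- def validate_lottery_numbers(prediction):
--     main_numbers = prediction[:6]
--     bonus_number = prediction[6]
--     powerball_number = prediction[7]
--
--     if len(set(main_numbers + [bonus_number])) != len(main_numbers) + 1:
--         return False, "Duplicate numbers found among main numbers and bonus."
--
--     if any(not (1 <= num <= 40) for num in main_numbers):
--         return False, "Main numbers should be between 1 and 40."
--
--     if not (1 <= bonus_number <= 40):
--         return False, "Bonus number should be between 1 and 40."
--
--     if not (1 <= powerball_number <= 10):
--         return False, "Powerball number should be between 1 and 10."
--
--     # single linear scan over the sorted mains: longest run of consecutive integers
--     s = sorted(main_numbers)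
--     best = run = 1
--     for prev, cur in zip(s, s[1:]):
--         run = run + 1 if cur - prev == 1 else 1
--         if run > best:
--             best = run
--
--     if best >= 5:
--         return False, "Avoiding consecutive number patterns of 5 integers."
--     if best >= 4:
--         return False, "Avoiding consecutive number patterns of 4 integers."
--
--     return True, "Validation successful."
-- ===== Notes on version B (the rewrite author's own statement) =====
-- stated objective: alternative
-- what changed: The two separate windowed passes over the sorted main numbers (all 5-windows, then all 4-windows) are replaced by one linear scan that tracks the longest run of consecutive integers and decides both messages from that single maximum; the per-element range loop becomes an any().
import Mathlib
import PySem

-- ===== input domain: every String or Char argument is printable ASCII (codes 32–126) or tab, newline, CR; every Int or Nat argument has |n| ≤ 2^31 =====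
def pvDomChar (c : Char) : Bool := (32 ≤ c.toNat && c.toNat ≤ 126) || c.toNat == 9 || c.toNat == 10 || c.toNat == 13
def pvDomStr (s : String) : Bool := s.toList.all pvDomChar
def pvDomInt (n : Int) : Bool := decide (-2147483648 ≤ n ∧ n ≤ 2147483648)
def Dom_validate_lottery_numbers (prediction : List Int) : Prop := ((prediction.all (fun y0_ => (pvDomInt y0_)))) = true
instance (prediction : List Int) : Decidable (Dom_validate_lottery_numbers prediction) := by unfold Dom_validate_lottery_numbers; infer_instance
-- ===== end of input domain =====

-- B replaces A's two windowed passes over the sorted main numbers by one linear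
-- longest-consecutive-run scan (alternative decomposition; same cost).


-- ===== PORT A =====
-- the `for num in main_numbers` loop: returns the error pair at the first offender
def vlnCheckMain : List Int → Option (Bool × String)
  | [] => none
  | n :: t =>
    if ¬ (1 ≤ n ∧ n ≤ 40) then some (false, "Main numbers should be between 1 and 40.")
    else vlnCheckMain t

def validate_lottery_numbers (prediction : List Int) : Bool × String :=
  let main_numbers := PySem.List.slice prediction none (some 6)
  match PySem.List.pyGet? prediction 6, PySem.List.pyGet? prediction 7 with
  | some bonus_number, some powerball_number =>
    if (PySem.Set.ofList (main_numbers ++ [bonus_number])).length ≠ main_numbers.length + 1 then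
      (false, "Duplicate numbers found among main numbers and bonus.")
    else match vlnCheckMain main_numbers with
    | some r => r
    | none =>
      if ¬ (1 ≤ bonus_number ∧ bonus_number ≤ 40) then
        (false, "Bonus number should be between 1 and 40.")
      else if ¬ (1 ≤ powerball_number ∧ powerball_number ≤ 10) then
        (false, "Powerball number should be between 1 and 10.")
      else
        let s := PySem.List.sorted main_numbers (fun x => x) false
        if (PySem.List.pyRange 0 ((s.length : Int) - 4) 1).any
             (fun i => PySem.List.pyGetD s (i + 4) 0 - PySem.List.pyGetD s i 0 == 4) then
          (false, "Avoiding consecutive number patterns of 5 integers.")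
        else if (PySem.List.pyRange 0 ((s.length : Int) - 3) 1).any
             (fun i => PySem.List.pyGetD s (i + 3) 0 - PySem.List.pyGetD s i 0 == 3) then
          (false, "Avoiding consecutive number patterns of 4 integers.")
        else
          (true, "Validation successful.")
  | _, _ => (false, "")   -- unreachable under Pre_ (IndexError in Python)

-- ===== PORT B =====
def validate_lottery_numbers_alt (prediction : List Int) : Bool × String :=
  let main_numbers := PySem.List.slice prediction none (some 6)
  match PySem.List.pyGet? prediction 6 with
  | none => (false, "")
  | some bonus_number =>
    match PySem.List.pyGet? prediction 7 with
    | none => (false, "")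
    | some powerball_number =>
    if (PySem.Set.ofList (main_numbers ++ [bonus_number])).length ≠ main_numbers.length + 1 then
      (false, "Duplicate numbers found among main numbers and bonus.")
    else if main_numbers.any (fun num => ¬ (1 ≤ num ∧ num ≤ 40)) then
      (false, "Main numbers should be between 1 and 40.")
    else if ¬ (1 ≤ bonus_number ∧ bonus_number ≤ 40) then
      (false, "Bonus number should be between 1 and 40.")
    else if ¬ (1 ≤ powerball_number ∧ powerball_number ≤ 10) then
      (false, "Powerball number should be between 1 and 10.")
    else
      let s := PySem.List.sorted main_numbers (fun x => x) false
      let best := ((s.zip (PySem.List.slice s (some 1) none)).foldl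
        (fun (st : Int × Int) (pc : Int × Int) =>
          let run := if pc.2 - pc.1 == 1 then st.1 + 1 else 1
          (run, if run > st.2 then run else st.2)) (1, 1)).2
      if best ≥ 5 then
        (false, "Avoiding consecutive number patterns of 5 integers.")
      else if best ≥ 4 then
        (false, "Avoiding consecutive number patterns of 4 integers.")
      else
        (true, "Validation successful.")

-- ===== PRECONDITION & SPEC =====
-- Python raises IndexError at prediction[6]/prediction[7] for shorter lists (B raises there too).
def Pre_validate_lottery_numbers (prediction : List Int) : Prop := 8 ≤ prediction.length
instance (prediction : List Int) : Decidable (Pre_validate_lottery_numbers prediction) := by unfold Pre_validate_lottery_numbers; infer_instance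
def pvWitness_validate_lottery_numbers : List Int := [1, 5, 9, 13, 17, 21, 25, 3]
def Spec_validate_lottery_numbers (prediction : List Int) (out : Bool × String) : Prop := out = validate_lottery_numbers_alt prediction
instance (prediction : List Int) (out : Bool × String) : Decidable (Spec_validate_lottery_numbers prediction out) := by unfold Spec_validate_lottery_numbers; infer_instance

-- ===== CLAIM (what is proved, stated in full; the proofs are below) =====
def Claim_equal_validate_lottery_numbers : Prop := ∀ (prediction : List Int), Dom_validate_lottery_numbers prediction → Pre_validate_lottery_numbers prediction → Spec_validate_lottery_numbers prediction (validate_lottery_numbers prediction)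

-- ===== LEMMAS AND PROOFS =====

-- a list whose set of distinct elements is as long as itself has no duplicates
lemma nodup_of_ofList_length {xs : List Int}
    (h : (PySem.Set.ofList xs).length = xs.length) : xs.Nodup := by
  have hperm : (PySem.Set.ofList xs).Perm xs.dedup := by
    refine (List.perm_ext_iff_of_nodup (PySem.Set.nodup_ofList _) xs.nodup_dedup).mpr ?_
    intro x; simp [PySem.Set.mem_ofList, List.mem_dedup]
  have hlen : xs.dedup.length = xs.length := by
    have := hperm.length_eq; omega
  have : xs.dedup = xs := (List.dedup_sublist xs).eq_of_length hlen
  exact List.dedup_eq_self.mp this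

-- the per-element range loop of A, as one boolean: error at the first offender ⟺ any offender
lemma vlnCheckMain_eq (xs : List Int) :
    vlnCheckMain xs =
      if xs.any (fun num => ¬ (1 ≤ num ∧ num ≤ 40)) then
        some (false, "Main numbers should be between 1 and 40.") else none := by
  induction xs with
  | nil => rfl
  | cons n t ih =>
    simp only [vlnCheckMain, ih, List.any_cons, Bool.or_eq_true]
    by_cases h : ¬ (1 ≤ n ∧ n ≤ 40)
    · simp [h]
    · rw [if_neg h]
      simp [not_not.mp h]

-- ===== VERDICT (by name: the statement is the Claim_ definition above) =====
set_option maxHeartbeats 2000000 in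
theorem validate_lottery_numbers_spec : Claim_equal_validate_lottery_numbers := by
  intro prediction _ hpre
  unfold Pre_validate_lottery_numbers at hpre
  unfold Spec_validate_lottery_numbers
  obtain ⟨p0, p1, p2, p3, p4, p5, p6, p7, rest, rfl⟩ :
      ∃ p0 p1 p2 p3 p4 p5 p6 p7 rest,
        prediction = p0 :: p1 :: p2 :: p3 :: p4 :: p5 :: p6 :: p7 :: rest := by
    match prediction, hpre with
    | p0 :: p1 :: p2 :: p3 :: p4 :: p5 :: p6 :: p7 :: rest, _ =>
      exact ⟨p0, p1, p2, p3, p4, p5, p6, p7, rest, rfl⟩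
  have hmain : PySem.List.slice (p0 :: p1 :: p2 :: p3 :: p4 :: p5 :: p6 :: p7 :: rest) none (some 6)
      = [p0, p1, p2, p3, p4, p5] := by
    rw [PySem.List.slice_to _ (by norm_num)]; rfl
  have h6 : PySem.List.pyGet? (p0 :: p1 :: p2 :: p3 :: p4 :: p5 :: p6 :: p7 :: rest) 6 = some p6 := by
    rw [show (6 : Int) = ((6 : Nat) : Int) from rfl, PySem.List.pyGet?_natCast]; rfl
  have h7 : PySem.List.pyGet? (p0 :: p1 :: p2 :: p3 :: p4 :: p5 :: p6 :: p7 :: rest) 7 = some p7 := by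
    rw [show (7 : Int) = ((7 : Nat) : Int) from rfl, PySem.List.pyGet?_natCast]; rfl
  simp only [validate_lottery_numbers, validate_lottery_numbers_alt, hmain, h6, h7,
    vlnCheckMain_eq, List.length_cons, List.length_nil]
  by_cases hdup :
      List.length (PySem.Set.ofList ([p0, p1, p2, p3, p4, p5] ++ [p6])) ≠ 0 + 1 + 1 + 1 + 1 + 1 + 1 + 1
  · rw [if_pos hdup, if_pos hdup]
  · rw [if_neg hdup, if_neg hdup]
    by_cases hrng : ([p0, p1, p2, p3, p4, p5].any fun num => decide ¬ (1 ≤ num ∧ num ≤ 40)) = true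
    · rw [if_pos hrng, if_pos hrng]
    · rw [if_neg hrng, if_neg hrng]
      by_cases hb : ¬ (1 ≤ p6 ∧ p6 ≤ 40)
      · rw [if_pos hb, if_pos hb]
      · rw [if_neg hb, if_neg hb]
        by_cases hp : ¬ (1 ≤ p7 ∧ p7 ≤ 10)
        · rw [if_pos hp, if_pos hp]
        · rw [if_neg hp, if_neg hp]
          -- the consecutive-pattern branch: both scans over the same sorted mains
          have hnodup7 : ([p0, p1, p2, p3, p4, p5] ++ [p6]).Nodup := by
            apply nodup_of_ofList_length
            simp only [List.length_append, List.length_cons, List.length_nil]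
            omega
          have hnodup : ([p0, p1, p2, p3, p4, p5] : List Int).Nodup := hnodup7.of_append_left
          have hlen : (PySem.List.sorted [p0, p1, p2, p3, p4, p5] (fun x : Int => x) false).length = 6 := by
            rw [PySem.List.length_sorted]; rfl
          obtain ⟨a, b, c, d, e, f, hse⟩ : ∃ a b c d e f,
              PySem.List.sorted [p0, p1, p2, p3, p4, p5] (fun x : Int => x) false = [a, b, c, d, e, f] := by
            match PySem.List.sorted [p0, p1, p2, p3, p4, p5] (fun x : Int => x) false, hlen with
            | [a, b, c, d, e, f], _ => exact ⟨a, b, c, d, e, f, rfl⟩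
          have hpw := PySem.List.sorted_pairwise [p0, p1, p2, p3, p4, p5] (fun x : Int => x)
          have hnd : (PySem.List.sorted [p0, p1, p2, p3, p4, p5] (fun x : Int => x) false).Nodup :=
            ((PySem.List.sorted_perm [p0, p1, p2, p3, p4, p5] (fun x : Int => x) false).nodup_iff).mpr hnodup
          rw [hse] at hpw hnd
          simp only [List.pairwise_cons, List.mem_cons, List.not_mem_nil,
            List.nodup_cons, or_false, forall_eq_or_imp, forall_eq, List.Pairwise.nil,
            and_true, List.nodup_nil, not_or] at hpw hnd
          have hord : a < b ∧ b < c ∧ c < d ∧ d < e ∧ e < f := by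
            obtain ⟨⟨hab, hac, had, hae, haf⟩, ⟨hbc, hbd, hbe, hbf⟩, ⟨hcd, hce, hcf⟩, ⟨hde, hdf⟩, hef⟩ := hpw
            obtain ⟨⟨nab, nac, nad, nae, naf⟩, ⟨nbc, nbd, nbe, nbf⟩, ⟨ncd, nce, ncf⟩, ⟨nde, ndf⟩, nef, _⟩ := hnd
            refine ⟨?_, ?_, ?_, ?_, ?_⟩ <;> omega
          rw [hse, PySem.List.slice_from _ (by norm_num)]
          simp only [List.length_cons, List.length_nil,
            (by decide : PySem.List.pyRange 0 (((0 + 1 + 1 + 1 + 1 + 1 + 1 : Nat) : Int) - 4) 1 = [0, 1]),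
            (by decide : PySem.List.pyRange 0 (((0 + 1 + 1 + 1 + 1 + 1 + 1 : Nat) : Int) - 3) 1 = [0, 1, 2]),
            List.any_cons, List.any_nil, Bool.or_eq_true, beq_iff_eq, Bool.false_eq_true, or_false]
          obtain ⟨h1, h2, h3, h4, h5⟩ := hord
          norm_num only [PySem.List.pyGetD_ofNat', List.getD_cons_succ, List.getD_cons_zero]
          by_cases hg1 : b - a = 1 <;> by_cases hg2 : c - b = 1 <;> by_cases hg3 : d - c = 1 <;>
            by_cases hg4 : e - d = 1 <;> by_cases hg5 : f - e = 1 <;>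
            (try norm_num [List.foldl_cons, List.foldl_nil, hg1, hg2, hg3, hg4, hg5]) <;>
            (try split_ifs) <;> first | rfl | omega
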